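-- pv_equiv track=rewrite | github.com/shinjipons/markdown-to-html | src/markdown/test.py | modify_list_with_prefix
-- ===== SOURCE A (Python) =====
-- def modify_list_with_prefix(input_list, prefix, new_item):
--     result = input_list.copy()
--     i = 0
--     while i < len(result):
--         if result[i].startswith(prefix):
--             # Find the end of the contiguous block
--             j = i + 1
--             while j < len(result) and result[j].startswith(prefix):
--                 j += 1
--
--             # Insert new items before and after the block
--             result.insert(i, new_item)
--             result.insert(j + 1, new_item)
--
--             # Move the index past the block and new items
--             i = j + 2
--         else:
--             i += 1
--
--     return result
-- ===== SOURCE B (Python) =====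
-- def modify_list_with_prefix(input_list, prefix, new_item):
--     result = []
--     in_block = False
--     for item in input_list:
--         matches = item.startswith(prefix)
--         if matches and not in_block:
--             result.append(new_item)
--             in_block = True
--         elif not matches and in_block:
--             result.append(new_item)
--             in_block = False
--         result.append(item)
--     if in_block:
--         result.append(new_item)
--     return result
-- ===== Notes on version B (the rewrite author's own statement) =====
-- stated objective: simpler
-- what changed: Replaced A's index-based while loop with an inner block-end scan plus two list.insert calls by a single flat pass that carries an in_block flag and only appends, adding the marker at block boundaries.
import Mathlib
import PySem

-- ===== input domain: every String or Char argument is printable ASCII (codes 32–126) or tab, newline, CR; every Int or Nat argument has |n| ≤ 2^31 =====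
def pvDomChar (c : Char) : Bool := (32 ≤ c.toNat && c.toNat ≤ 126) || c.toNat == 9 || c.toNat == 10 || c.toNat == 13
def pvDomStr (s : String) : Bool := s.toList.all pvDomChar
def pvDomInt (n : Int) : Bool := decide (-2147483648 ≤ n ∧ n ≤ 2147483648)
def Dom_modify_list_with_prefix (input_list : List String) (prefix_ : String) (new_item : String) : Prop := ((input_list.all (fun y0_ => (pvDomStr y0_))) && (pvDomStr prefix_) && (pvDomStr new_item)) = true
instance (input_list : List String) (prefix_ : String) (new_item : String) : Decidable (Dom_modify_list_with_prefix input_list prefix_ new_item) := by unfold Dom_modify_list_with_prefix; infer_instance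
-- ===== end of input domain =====

-- B replaces A's index-based while loop (inner block-end scan + two list.insert calls) by a single
-- flat pass with an in_block flag that only appends (objective: simpler; A works on a copy, so no
-- observable mutation is involved).

-- ===== PORT A =====
-- inner while loop: 'j = i + 1; while j < len(result) and result[j].startswith(prefix): j += 1'
def pvLoopAJ (result : List String) (prefix_ : String) (j : Nat) : Nat :=
  if h : j < result.length then
    if PySem.Str.startswith (result.getD j "") prefix_ then
      pvLoopAJ result prefix_ (j + 1)
    else j
  else j
termination_by result.length - j
decreasing_by omega

-- the loop index never decreases (needed for the outer loop's termination)
theorem pvLoopAJ_ge (result : List String) (prefix_ : String) (j : Nat) :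
    j ≤ pvLoopAJ result prefix_ j := by
  have H : ∀ n j, result.length - j ≤ n → j ≤ pvLoopAJ result prefix_ j := by
    intro n
    induction n with
    | zero =>
      intro j hj
      rw [pvLoopAJ]
      split
      · omega
      · exact le_refl j
    | succ n ih =>
      intro j hj
      rw [pvLoopAJ]
      split
      · split
        · have := ih (j + 1) (by omega)
          omega
        · exact le_refl j
      · exact le_refl j
  exact H (result.length - j) j (le_refl _)

-- outer while loop of A
def pvLoopA (result : List String) (prefix_ new_item : String) (i : Nat) : List String :=
  if h : i < result.length then
    if PySem.Str.startswith (result.getD i "") prefix_ then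
      let j := pvLoopAJ result prefix_ (i + 1)
      let r1 := PySem.List.insert result (i : Int) new_item
      let r2 := PySem.List.insert r1 ((j : Int) + 1) new_item
      pvLoopA r2 prefix_ new_item (j + 2)
    else
      pvLoopA result prefix_ new_item (i + 1)
  else result
termination_by result.length - i
decreasing_by
  · have h1 := pvLoopAJ_ge result prefix_ (i + 1)
    have h2 : (PySem.List.insert (PySem.List.insert result (i : Int) new_item)
        ((pvLoopAJ result prefix_ (i + 1) : Int) + 1) new_item).length = result.length + 2 := by
      simp [PySem.List.length_insert]
    omega
  · omega

def modify_list_with_prefix (input_list : List String) (prefix_ : String) (new_item : String) : List String :=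
  pvLoopA input_list prefix_ new_item 0

-- ===== PORT B =====
def modify_list_with_prefix_alt (input_list : List String) (prefix_ : String) (new_item : String) : List String :=
  let st := input_list.foldl
    (fun (st : List String × Bool) item =>
      let m_ := PySem.Str.startswith item prefix_
      if m_ && !st.2 then (st.1 ++ [new_item, item], true)
      else if !m_ && st.2 then (st.1 ++ [new_item, item], false)
      else (st.1 ++ [item], st.2))
    ([], false)
  if st.2 then st.1 ++ [new_item] else st.1

-- ===== PRECONDITION & SPEC =====
def Spec_modify_list_with_prefix (input_list : List String) (prefix_ : String) (new_item : String) (out : List String) : Prop := out = modify_list_with_prefix_alt input_list prefix_ new_item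
instance (input_list : List String) (prefix_ : String) (new_item : String) (out : List String) : Decidable (Spec_modify_list_with_prefix input_list prefix_ new_item out) := by unfold Spec_modify_list_with_prefix; infer_instance

-- ===== CLAIM (what is proved, stated in full; the proofs are below) =====
def Claim_equal_modify_list_with_prefix : Prop := ∀ (input_list : List String) (prefix_ : String) (new_item : String), Dom_modify_list_with_prefix input_list prefix_ new_item → Spec_modify_list_with_prefix input_list prefix_ new_item (modify_list_with_prefix input_list prefix_ new_item)

-- ===== LEMMAS AND PROOFS =====

-- proof-side wrapper for the prefix test (keeps simp from bridging to PySem.Chars mid-proof)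
def pvSW (prefix_ : String) (s : String) : Bool := PySem.Str.startswith s prefix_

theorem pvSW_eq (prefix_ s : String) : PySem.Str.startswith s prefix_ = pvSW prefix_ s := rfl

-- recursive description of B's flat pass (proof device)
def pvGo (prefix_ new_item : String) : List String → Bool → List String
  | [], ib => if ib then [new_item] else []
  | x :: xs, ib =>
    if pvSW prefix_ x && !ib then new_item :: x :: pvGo prefix_ new_item xs true
    else if !(pvSW prefix_ x) && ib then new_item :: x :: pvGo prefix_ new_item xs false
    else x :: pvGo prefix_ new_item xs ib

theorem pvAlt_foldl (prefix_ new_item : String) :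
    ∀ (xs : List String) (acc : List String) (ib : Bool),
      (let st := xs.foldl
        (fun (st : List String × Bool) item =>
          let m_ := PySem.Str.startswith item prefix_
          if m_ && !st.2 then (st.1 ++ [new_item, item], true)
          else if !m_ && st.2 then (st.1 ++ [new_item, item], false)
          else (st.1 ++ [item], st.2))
        (acc, ib)
       if st.2 then st.1 ++ [new_item] else st.1) = acc ++ pvGo prefix_ new_item xs ib := by
  intro xs
  induction xs with
  | nil =>
    intro acc ib
    cases ib <;> simp [pvGo]
  | cons x xs ih =>
    intro acc ib
    rw [List.foldl_cons, pvGo]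
    simp only [pvSW_eq] at ih ⊢
    cases hm : pvSW prefix_ x <;> cases ib <;>
      simp only [Bool.not_true, Bool.not_false, Bool.and_false, Bool.and_true,
        Bool.false_eq_true, if_true, if_false] <;>
      rw [ih] <;> simp

theorem pvAlt_eq_go (input_list : List String) (prefix_ new_item : String) :
    modify_list_with_prefix_alt input_list prefix_ new_item =
      pvGo prefix_ new_item input_list false := by
  have := pvAlt_foldl prefix_ new_item input_list [] false
  simpa [modify_list_with_prefix_alt] using this

-- recursive description of A's block processing
def pvGA (prefix_ new_item : String) : List String → List String
  | [] => []
  | x :: xs =>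
    if pvSW prefix_ x then
      new_item :: x :: (xs.takeWhile (pvSW prefix_)) ++
        new_item :: pvGA prefix_ new_item (xs.dropWhile (pvSW prefix_))
    else x :: pvGA prefix_ new_item xs
termination_by xs => xs.length
decreasing_by
  · have := List.length_dropWhile_le (pvSW prefix_) xs
    simp only [List.length_cons]
    omega
  · simp only [List.length_cons]; omega

-- pvGA equals pvGo with the flag; both directions at once by strong induction on length
theorem pvGA_eq_pvGo (prefix_ new_item : String) : ∀ (n : Nat) (xs : List String), xs.length ≤ n →
    pvGA prefix_ new_item xs = pvGo prefix_ new_item xs false ∧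
    pvGo prefix_ new_item xs true =
      (xs.takeWhile (pvSW prefix_)) ++
        new_item :: pvGA prefix_ new_item (xs.dropWhile (pvSW prefix_)) := by
  intro n
  induction n with
  | zero =>
    intro xs hxs
    have : xs = [] := List.eq_nil_of_length_eq_zero (by omega)
    subst this
    simp [pvGA, pvGo]
  | succ n ih =>
    intro xs hxs
    cases xs with
    | nil => simp [pvGA, pvGo]
    | cons x xs =>
      have hxs' : xs.length ≤ n := by simp only [List.length_cons] at hxs; omega
      cases hm : pvSW prefix_ x
      · have h1 := (ih xs hxs').1
        constructor
        · rw [pvGA, pvGo]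
          simp [hm, h1]
        · rw [pvGo]
          simp only [List.takeWhile_cons, List.dropWhile_cons, hm, Bool.false_and,
            Bool.not_false, Bool.true_and, if_true]
          rw [pvGA.eq_def]
          simp [hm, h1]
      · constructor
        · have h2 := (ih xs hxs').2
          rw [pvGA, pvGo]
          simp [hm, h2]
        · rw [pvGo]
          simp only [List.takeWhile_cons, List.dropWhile_cons, hm, Bool.true_and,
            Bool.not_true, Bool.false_and, if_true]
          have h2 := (ih xs hxs').2
          simp [h2]

-- the inner scan finds the end of the contiguous matching block
theorem pvLoopAJ_spec (prefix_ : String) : ∀ (post pre : List String),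
    pvLoopAJ (pre ++ post) prefix_ pre.length =
      pre.length + (post.takeWhile (pvSW prefix_)).length := by
  intro post
  induction post with
  | nil => intro pre; rw [pvLoopAJ]; simp
  | cons y ys ih =>
    intro pre
    rw [pvLoopAJ]
    have hlen : pre.length < (pre ++ y :: ys).length := by simp
    have hget : (pre ++ y :: ys).getD pre.length "" = y := by
      simp [List.getD_eq_getElem?_getD]
    rw [dif_pos hlen, hget, pvSW_eq]
    cases hm : pvSW prefix_ y
    · rw [if_neg (by simp)]
      simp [hm]
    · rw [if_pos (by simp)]
      have hstep := ih (pre ++ [y])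
      rw [List.append_assoc] at hstep
      simp only [List.length_append, List.length_cons, List.length_nil, List.cons_append,
        List.nil_append] at hstep
      rw [hstep]
      simp only [List.takeWhile_cons, hm, if_true, List.length_cons]
      omega

-- main invariant: the outer loop at index done.length over done ++ rest keeps done and processes rest
theorem pvLoopA_spec (prefix_ new_item : String) : ∀ (n : Nat) (rest done : List String), rest.length ≤ n →
    pvLoopA (done ++ rest) prefix_ new_item done.length =
      done ++ pvGA prefix_ new_item rest := by
  intro n
  induction n with
  | zero =>
    intro rest done hr
    have : rest = [] := List.eq_nil_of_length_eq_zero (by omega)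
    subst this
    rw [pvLoopA]
    simp [pvGA]
  | succ n ih =>
    intro rest done hr
    cases rest with
    | nil => rw [pvLoopA]; simp [pvGA]
    | cons x xs =>
      have hr' : xs.length ≤ n := by simp only [List.length_cons] at hr; omega
      rw [pvLoopA]
      have hlen : done.length < (done ++ x :: xs).length := by simp
      have hget : (done ++ x :: xs).getD done.length "" = x := by
        simp [List.getD_eq_getElem?_getD]
      rw [dif_pos hlen, hget, pvSW_eq]
      cases hm : pvSW prefix_ x
      · rw [if_neg (by simp)]
        have hrec := ih xs (done ++ [x]) hr'
        rw [show done ++ x :: xs = (done ++ [x]) ++ xs by simp,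
            show done.length + 1 = (done ++ [x]).length by simp]
        rw [hrec, pvGA]
        simp [hm]
      · rw [if_pos (by simp)]
        -- the inner scan returns done.length + 1 + |block|
        have hj : pvLoopAJ (done ++ x :: xs) prefix_ (done.length + 1) =
            done.length + 1 + (xs.takeWhile (pvSW prefix_)).length := by
          have hstep := pvLoopAJ_spec prefix_ xs (done ++ [x])
          rw [List.append_assoc] at hstep
          simp only [List.length_append, List.length_cons, List.length_nil, List.cons_append,
            List.nil_append] at hstep
          omega
        set B := xs.takeWhile (pvSW prefix_) with hB
        set R := xs.dropWhile (pvSW prefix_) with hR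
        have hxs : xs = B ++ R := (List.takeWhile_append_dropWhile (p := pvSW prefix_) (l := xs)).symm
        -- first insert: before the block
        have hins1 : PySem.List.insert (done ++ x :: xs) (done.length : Int) new_item =
            done ++ new_item :: x :: xs := by
          rw [PySem.List.insert_natCast _ _ _ (by simp)]
          simp
        -- second insert: after the block
        have hins2 : PySem.List.insert (done ++ new_item :: x :: xs)
            ((↑(done.length + 1 + B.length) : Int) + 1) new_item =
            (done ++ new_item :: x :: B ++ [new_item]) ++ R := by
          have hcast : ((↑(done.length + 1 + B.length) : Int) + 1) =
              ((done.length + B.length + 2 : Nat) : Int) := by push_cast; ring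
          rw [hcast, PySem.List.insert_natCast _ _ _ (by simp [hxs]; omega)]
          rw [hxs, show done ++ new_item :: x :: (B ++ R) = (done ++ new_item :: x :: B) ++ R by simp,
              show done.length + B.length + 2 = (done ++ new_item :: x :: B).length by simp; omega]
          rw [List.take_left, List.drop_left]
          simp
        simp only [hj, hins1, hins2]
        have hRlen : R.length ≤ n := by
          have := List.length_dropWhile_le (pvSW prefix_) xs
          simp only [hR]
          omega
        have hrec := ih R (done ++ new_item :: x :: B ++ [new_item]) hRlen
        rw [show done.length + 1 + B.length + 2 =
              (done ++ new_item :: x :: B ++ [new_item]).length by simp; omega]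
        rw [hrec, pvGA]
        simp [hm, ← hB, ← hR]

-- ===== VERDICT (by name: the statement is the Claim_ definition above) =====
theorem modify_list_with_prefix_spec : Claim_equal_modify_list_with_prefix := by
  intro input_list prefix_ new_item _
  unfold Spec_modify_list_with_prefix
  have hA : modify_list_with_prefix input_list prefix_ new_item =
      pvGA prefix_ new_item input_list := by
    have := pvLoopA_spec prefix_ new_item input_list.length input_list [] (le_refl _)
    simpa [modify_list_with_prefix] using this
  rw [hA, pvAlt_eq_go,
    (pvGA_eq_pvGo prefix_ new_item input_list.length input_list (le_refl _)).1]
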